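-- pv_equiv track=rewrite | github.com/tru17189/Proyectos-de-musica | Generador de formas/main.py | TerceraLista
-- ===== SOURCE A (Python) =====
-- def TerceraLista(relleno):
--     contador = 0
--     lista = []
--     for i in relleno:
--         if contador == 0:
--             lista.append(1)
--             contador += 1
--         elif contador == 3:
--             lista.append(0)
--             contador = 0
--         else:
--             lista.append(0)
--             contador += 1
--     return lista
-- ===== SOURCE B (Python) =====
-- def TerceraLista(relleno):
--     n = len(relleno)
--     return ([1, 0, 0, 0] * ((n + 3) // 4))[:n]
-- ===== Notes on version B (the rewrite author's own statement) =====
-- stated objective: idiomatic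
-- what changed: Replaces the per-element cycling counter and three-way branch with tiling the fixed block [1,0,0,0] ceil(n/4) times and truncating to length n.
import Mathlib
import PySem

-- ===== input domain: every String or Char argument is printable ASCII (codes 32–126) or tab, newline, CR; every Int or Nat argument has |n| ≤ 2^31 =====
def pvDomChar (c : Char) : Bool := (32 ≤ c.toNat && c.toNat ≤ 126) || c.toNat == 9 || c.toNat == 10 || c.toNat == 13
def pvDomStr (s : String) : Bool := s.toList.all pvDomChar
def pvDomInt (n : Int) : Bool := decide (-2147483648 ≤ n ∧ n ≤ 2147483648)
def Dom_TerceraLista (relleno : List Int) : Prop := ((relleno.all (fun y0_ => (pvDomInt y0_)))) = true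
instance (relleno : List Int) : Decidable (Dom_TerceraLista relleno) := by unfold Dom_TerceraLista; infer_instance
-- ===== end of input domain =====

-- B replaces A's cycling counter and branches with tiling the block [1,0,0,0] and truncating (idiomatic; same cost).

-- ===== PORT A =====
-- the loop over `relleno` with state (contador, lista), transliterated as structural recursion
def TerceraListaGo (xs : List Int) (contador : Int) : List Int :=
  match xs with
  | [] => []
  | _ :: rest =>
    if contador = 0 then 1 :: TerceraListaGo rest (contador + 1)
    else if contador = 3 then 0 :: TerceraListaGo rest 0
    else 0 :: TerceraListaGo rest (contador + 1)

def TerceraLista (relleno : List Int) : List Int := TerceraListaGo relleno 0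

-- ===== PORT B =====
-- n = len(relleno); ([1,0,0,0] * ((n+3)//4))[:n]
def TerceraLista_alt (relleno : List Int) : List Int :=
  let n := relleno.length
  (List.flatten (List.replicate ((n + 3) / 4) ([1, 0, 0, 0] : List Int))).take n

-- ===== PRECONDITION & SPEC =====
def Spec_TerceraLista (relleno : List Int) (out : List Int) : Prop := out = TerceraLista_alt relleno
instance (relleno : List Int) (out : List Int) : Decidable (Spec_TerceraLista relleno out) := by unfold Spec_TerceraLista; infer_instance

-- ===== CLAIM (what is proved, stated in full; the proofs are below) =====
def Claim_equal_TerceraLista : Prop := ∀ (relleno : List Int), Dom_TerceraLista relleno → Spec_TerceraLista relleno (TerceraLista relleno)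

-- ===== LEMMAS AND PROOFS =====

-- common reference: emit (1 if c = 0 else 0), counter advances mod 4
def pvF (n : Nat) (c : Nat) : List Int :=
  match n with
  | 0 => []
  | n + 1 => (if c = 0 then (1 : Int) else 0) :: pvF n ((c + 1) % 4)

theorem pvGo_eq_pvF (xs : List Int) (c : Nat) (hc : c < 4) :
    TerceraListaGo xs (c : Int) = pvF xs.length c := by
  induction xs generalizing c with
  | nil => simp [TerceraListaGo, pvF]
  | cons x rest ih =>
    interval_cases c <;>
      simp [TerceraListaGo, pvF] <;>
      [exact ih 1 (by norm_num); exact ih 2 (by norm_num);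
       exact ih 3 (by norm_num); exact ih 0 (by norm_num)]

theorem pvF_take (n : Nat) (c k : Nat) : (pvF n c).take k = pvF (min k n) c := by
  induction n generalizing c k with
  | zero => simp [pvF]
  | succ n ih =>
    cases k with
    | zero => simp [pvF]
    | succ k => simp [pvF, ih, Nat.succ_min_succ]

theorem pvFlatten_replicate (k : Nat) :
    List.flatten (List.replicate k ([1, 0, 0, 0] : List Int)) = pvF (4 * k) 0 := by
  induction k with
  | zero => simp [pvF]
  | succ k ih =>
    have h4 : 4 * (k + 1) = (4 * k) + 1 + 1 + 1 + 1 := by omega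
    rw [h4]; simp [List.replicate_succ, ih, pvF]

-- ===== VERDICT (by name: the statement is the Claim_ definition above) =====
theorem TerceraLista_spec : Claim_equal_TerceraLista := by
  intro relleno _
  unfold Spec_TerceraLista TerceraLista TerceraLista_alt
  have h0 := pvGo_eq_pvF relleno 0 (by norm_num)
  simp only [Nat.cast_zero] at h0
  rw [h0]
  show pvF relleno.length 0 =
    (List.flatten (List.replicate ((relleno.length + 3) / 4) ([1, 0, 0, 0] : List Int))).take relleno.length
  rw [pvFlatten_replicate, pvF_take,
      Nat.min_eq_left (by omega : relleno.length ≤ 4 * ((relleno.length + 3) / 4))]
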